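-- pv_equiv track=rewrite | github.com/EtcetFelix/voice-email-agent | voice_agent/email_services/email_service.py | format_email_message
-- ===== SOURCE A (Python) =====
-- def format_email_message(message_text: str) -> str:
--     """
--     Format plain text message to HTML for email.
--
--     Args:
--         message_text: Plain text message content
--
--     Returns:
--         str: HTML formatted content
--     """
--     # Split into paragraphs
--     paragraphs = message_text.split("\n\n")
--
--     # Format each paragraph
--     formatted_paragraphs = []
--     for paragraph in paragraphs:
--         lines = paragraph.split("\n")
--         formatted_paragraph = "<br>".join(lines)
--         formatted_paragraphs.append(formatted_paragraph)
--
--     # Join with double breaks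
--     html_content = "<br><br>".join(formatted_paragraphs)
--
--     # Wrap in div
--     return f'<div dir="ltr">{html_content}</div>'
-- ===== SOURCE B (Python) =====
-- def format_email_message(message_text: str) -> str:
--     """
--     Format plain text message to HTML for email.
--
--     Single global substitution: replacing every newline with '<br>' is exactly
--     what A's two-level split/join produces, because each double-newline
--     boundary becomes '<br><br>' and each single newline becomes '<br>'.
--     """
--     return '<div dir="ltr">' + message_text.replace("\n", "<br>") + '</div>'
-- ===== Notes on version B (the rewrite author's own statement) =====
-- stated objective: simpler
-- what changed: The nested split('\n\n')/split('\n') with a paragraph-list loop and two joins collapses to one global str.replace of '\n' by '<br>' in a single expression.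
import Mathlib
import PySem

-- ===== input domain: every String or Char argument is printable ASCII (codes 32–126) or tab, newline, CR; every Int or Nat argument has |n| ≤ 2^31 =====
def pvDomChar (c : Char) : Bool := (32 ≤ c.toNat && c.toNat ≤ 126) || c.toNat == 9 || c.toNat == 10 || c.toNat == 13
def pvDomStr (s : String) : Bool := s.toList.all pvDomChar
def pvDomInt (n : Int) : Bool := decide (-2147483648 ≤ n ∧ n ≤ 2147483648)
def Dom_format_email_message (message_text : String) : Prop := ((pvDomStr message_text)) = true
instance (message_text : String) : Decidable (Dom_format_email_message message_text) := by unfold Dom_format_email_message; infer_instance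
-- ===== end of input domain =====

-- B replaces A's split('\n\n')/split('\n') loop with two joins by one global replace of '\n' with '<br>' (simpler; same result).

-- ===== PORT A =====
-- Python: paragraphs = message_text.split("\n\n"); loop joining each paragraph's
-- lines with "<br>"; join paragraphs with "<br><br>"; wrap in the div.
-- (split? with a nonempty literal separator is always `some`, hence the getD [].)
def format_email_message (message_text : String) : String :=
  let paragraphs := (PySem.Str.split? message_text "\n\n").getD []
  let formatted_paragraphs := paragraphs.foldl
    (fun acc paragraph =>
      let lines := (PySem.Str.split? paragraph "\n").getD []
      let formatted_paragraph := PySem.Str.join "<br>" lines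
      acc ++ [formatted_paragraph]) []
  let html_content := PySem.Str.join "<br><br>" formatted_paragraphs
  "<div dir=\"ltr\">" ++ html_content ++ "</div>"

-- ===== PORT B =====
def format_email_message_alt (message_text : String) : String :=
  "<div dir=\"ltr\">" ++ PySem.Str.replace message_text "\n" "<br>" ++ "</div>"

-- ===== PRECONDITION & SPEC =====
def Spec_format_email_message (message_text : String) (out : String) : Prop := out = format_email_message_alt message_text
instance (message_text : String) (out : String) : Decidable (Spec_format_email_message message_text out) := by unfold Spec_format_email_message; infer_instance

-- ===== CLAIM (what is proved, stated in full; the proofs are below) =====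
def Claim_equal_format_email_message : Prop := ∀ (message_text : String), Dom_format_email_message message_text → Spec_format_email_message message_text (format_email_message message_text)

-- ===== LEMMAS AND PROOFS =====

-- The expansion both sides compute: every '\n' becomes "<br>".
def pvF (c : Char) : List Char := if c = '\n' then ['<','b','r','>'] else [c]
def pvExp (l : List Char) : List Char := l.flatMap pvF

-- cons a char onto the first piece
def pvConsHead (c : Char) : List (List Char) → List (List Char)
  | [] => [[c]]
  | p :: ps => (c :: p) :: ps

-- prepend a chunk onto the first piece
def pvPrepend (cs : List Char) : List (List Char) → List (List Char)
  | [] => [cs]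
  | p :: ps => (cs ++ p) :: ps

-- reference splitters for the two literal separators
def pvSplitN : List Char → List (List Char)
  | [] => [[]]
  | '\n' :: t => [] :: pvSplitN t
  | c :: t => pvConsHead c (pvSplitN t)

def pvSplitNN : List Char → List (List Char)
  | '\n' :: '\n' :: t => [] :: pvSplitNN t
  | c :: t => pvConsHead c (pvSplitNN t)
  | [] => [[]]

theorem pvSplitN_ne (l : List Char) : pvSplitN l ≠ [] := by
  induction l using pvSplitN.induct <;> simp_all [pvSplitN]
  · next c t h ih => cases h' : pvSplitN t <;> simp [pvConsHead]

theorem pvSplitNN_ne (l : List Char) : pvSplitNN l ≠ [] := by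
  induction l using pvSplitNN.induct <;> simp_all [pvSplitNN]
  · next c t h ih => cases h' : pvSplitNN t <;> simp [pvConsHead]

theorem pvSplitNN_cons (c : Char) (t : List Char) (h : ¬(c = '\n' ∧ ∃ u, t = '\n' :: u)) :
    pvSplitNN (c :: t) = pvConsHead c (pvSplitNN t) := by
  rw [pvSplitNN.eq_def]
  split <;> simp_all [pvConsHead]

theorem pvPrepend_nil (ps : List (List Char)) (h : ps ≠ []) : pvPrepend [] ps = ps := by
  cases ps <;> simp_all [pvPrepend]

theorem pvSplitN_cons_ne (c : Char) (t : List Char) (hc : c ≠ '\n') :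
    pvSplitN (c :: t) = pvConsHead c (pvSplitN t) := by
  rw [pvSplitN.eq_def]
  split <;> simp_all [pvConsHead]

theorem splitOn_go_N (l : List Char) : ∀ (fuel : Nat) (cur : List Char) (acc : List (List Char)),
    l.length < fuel →
    PySem.Chars.splitOn.go ['\n'] fuel l cur acc = acc.reverse ++ pvPrepend cur.reverse (pvSplitN l) := by
  induction l with
  | nil =>
    intro fuel cur acc h
    cases fuel with
    | zero => omega
    | succ f => simp [PySem.Chars.splitOn.go, pvSplitN, pvPrepend]
  | cons c t ih =>
    intro fuel cur acc h
    cases fuel with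
    | zero => omega
    | succ f =>
      by_cases hc : c = '\n'
      · subst hc
        rw [show PySem.Chars.splitOn.go ['\n'] (f+1) ('\n' :: t) cur acc
              = PySem.Chars.splitOn.go ['\n'] f t [] (cur.reverse :: acc) by
            simp [PySem.Chars.splitOn.go, List.isPrefixOf]]
        rw [ih f [] (cur.reverse :: acc) (by simpa using h)]
        rw [show pvSplitN ('\n' :: t) = [] :: pvSplitN t from rfl]
        cases hsp : pvSplitN t with
        | nil => exact absurd hsp (pvSplitN_ne t)
        | cons p ps => simp [pvPrepend]
      · have hb : ('\n' == c) = false := by simp [Ne.symm hc]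
        rw [show PySem.Chars.splitOn.go ['\n'] (f+1) (c :: t) cur acc
              = PySem.Chars.splitOn.go ['\n'] f t (c :: cur) acc by
            simp [PySem.Chars.splitOn.go, List.isPrefixOf, hb]]
        rw [ih f (c :: cur) acc (by simpa using h), pvSplitN_cons_ne c t hc]
        cases hsp : pvSplitN t with
        | nil => exact absurd hsp (pvSplitN_ne t)
        | cons p ps => simp [pvConsHead, pvPrepend]

theorem splitN_eq (l : List Char) : PySem.Chars.splitOn l ['\n'] = pvSplitN l := by
  rw [PySem.Chars.splitOn, splitOn_go_N l (l.length + 1) [] [] (by omega)]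
  simp [pvPrepend_nil _ (pvSplitN_ne l)]

theorem splitOn_go_NN (l : List Char) : ∀ (fuel : Nat) (cur : List Char) (acc : List (List Char)),
    l.length < fuel →
    PySem.Chars.splitOn.go ['\n','\n'] fuel l cur acc = acc.reverse ++ pvPrepend cur.reverse (pvSplitNN l) := by
  induction l using pvSplitNN.induct with
  | case3 =>
    intro fuel cur acc h
    cases fuel with
    | zero => omega
    | succ f => simp [PySem.Chars.splitOn.go, pvSplitNN, pvPrepend]
  | case1 t ih =>
    intro fuel cur acc h
    cases fuel with
    | zero => omega
    | succ f =>
      rw [show PySem.Chars.splitOn.go ['\n','\n'] (f+1) ('\n' :: '\n' :: t) cur acc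
            = PySem.Chars.splitOn.go ['\n','\n'] f t [] (cur.reverse :: acc) by
          simp [PySem.Chars.splitOn.go, List.isPrefixOf]]
      rw [ih f [] (cur.reverse :: acc) (by simp at h ⊢; omega)]
      rw [show pvSplitNN ('\n' :: '\n' :: t) = [] :: pvSplitNN t from by rw [pvSplitNN.eq_def]; rfl]
      cases hsp : pvSplitNN t with
      | nil => exact absurd hsp (pvSplitNN_ne t)
      | cons p ps => simp [pvPrepend]
  | case2 c t hnd ih =>
    have hkey : ¬(c = '\n' ∧ ∃ u, t = '\n' :: u) := by
      rintro ⟨hc, u, hu⟩; exact hnd u hc hu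
    intro fuel cur acc h
    cases fuel with
    | zero => omega
    | succ f =>
      have hpre : List.isPrefixOf ['\n','\n'] (c :: t) = false := by
        cases t with
        | nil => cases hc : ('\n' == c) <;> simp [List.isPrefixOf, hc]
        | cons d u =>
          by_cases hc : c = '\n'
          · have hd : d ≠ '\n' := fun hd => hkey ⟨hc, u, by rw [hd]⟩
            simp [List.isPrefixOf, hc, Ne.symm hd]
          · simp [List.isPrefixOf, Ne.symm hc]
      rw [show PySem.Chars.splitOn.go ['\n','\n'] (f+1) (c :: t) cur acc
            = PySem.Chars.splitOn.go ['\n','\n'] f t (c :: cur) acc by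
          simp [PySem.Chars.splitOn.go, hpre]]
      rw [ih f (c :: cur) acc (by simpa using h), pvSplitNN_cons c t hkey]
      cases hsp : pvSplitNN t with
      | nil => exact absurd hsp (pvSplitNN_ne t)
      | cons p ps => simp [pvConsHead, pvPrepend]

theorem splitNN_eq (l : List Char) : PySem.Chars.splitOn l ['\n','\n'] = pvSplitNN l := by
  rw [PySem.Chars.splitOn, splitOn_go_NN l (l.length + 1) [] [] (by omega)]
  simp [pvPrepend_nil _ (pvSplitNN_ne l)]

-- joining the single-newline split with "<br>" expands every '\n'
theorem joinN_eq (l : List Char) :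
    PySem.Chars.join ['<','b','r','>'] (pvSplitN l) = pvExp l := by
  induction l using pvSplitN.induct with
  | case1 => simp [pvSplitN, PySem.Chars.join_singleton, pvExp]
  | case2 t ih =>
    cases hsp : pvSplitN t with
    | nil => exact absurd hsp (pvSplitN_ne t)
    | cons p ps =>
      rw [show pvSplitN ('\n' :: t) = [] :: pvSplitN t from rfl, hsp,
          PySem.Chars.join_cons_cons, ← hsp, ih]
      simp [pvExp, pvF]
  | case3 c t hc ih =>
    have hc' : c ≠ '\n' := by simpa using hc
    cases hsp : pvSplitN t with
    | nil => exact absurd hsp (pvSplitN_ne t)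
    | cons p ps =>
      rw [pvSplitN_cons_ne c t hc', hsp, pvConsHead]
      have h2 : pvExp (c :: t) = c :: pvExp t := by simp [pvExp, pvF, hc']
      cases ps with
      | nil =>
        rw [PySem.Chars.join_singleton, h2, ← ih, hsp, PySem.Chars.join_singleton]
      | cons q qs =>
        rw [PySem.Chars.join_cons_cons, h2, ← ih, hsp, PySem.Chars.join_cons_cons]
        simp

-- joining the expanded paragraphs with "<br><br>" expands every '\n'
theorem joinNN_eq (l : List Char) :
    PySem.Chars.join ("<br><br>".toList) (List.map pvExp (pvSplitNN l)) = pvExp l := by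
  induction l using pvSplitNN.induct with
  | case3 => simp [pvSplitNN, PySem.Chars.join_singleton, pvExp]
  | case1 t ih =>
    cases hsp : pvSplitNN t with
    | nil => exact absurd hsp (pvSplitNN_ne t)
    | cons p ps =>
      rw [show pvSplitNN ('\n' :: '\n' :: t) = [] :: pvSplitNN t from by rw [pvSplitNN.eq_def]; rfl, hsp]
      rw [List.map, List.map, PySem.Chars.join_cons_cons]
      rw [show PySem.Chars.join "<br><br>".toList (pvExp p :: List.map pvExp ps)
            = PySem.Chars.join "<br><br>".toList (List.map pvExp (pvSplitNN t)) by rw [hsp]; rfl, ih]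
      simp [pvExp, pvF]
  | case2 c t hnd ih =>
    have hkey : ¬(c = '\n' ∧ ∃ u, t = '\n' :: u) := by
      rintro ⟨hc, u, hu⟩; exact hnd u hc hu
    cases hsp : pvSplitNN t with
    | nil => exact absurd hsp (pvSplitNN_ne t)
    | cons p ps =>
      rw [pvSplitNN_cons c t hkey, hsp, pvConsHead]
      have h2 : pvExp (c :: p) = pvF c ++ pvExp p := by simp [pvExp]
      have h3 : pvExp (c :: t) = pvF c ++ pvExp t := by simp [pvExp]
      cases ps with
      | nil =>
        simp only [List.map_cons, List.map_nil, PySem.Chars.join_singleton, h2, h3]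
        rw [← ih, hsp, List.map_cons, List.map_nil, PySem.Chars.join_singleton]
      | cons q qs =>
        simp only [List.map_cons, PySem.Chars.join_cons_cons, h2, h3]
        rw [← ih, hsp]
        simp only [List.map_cons, PySem.Chars.join_cons_cons, List.append_assoc]

-- replace with the single-char pattern '\n' expands every '\n'
theorem replace_go_eq (l : List Char) : ∀ (fuel : Nat) (acc : List Char),
    l.length ≤ fuel →
    PySem.Chars.replace.go ['\n'] ['<','b','r','>'] fuel l acc = acc.reverse ++ pvExp l := by
  induction l with
  | nil =>
    intro fuel acc h
    cases fuel <;> simp [PySem.Chars.replace.go, pvExp]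
  | cons c t ih =>
    intro fuel acc h
    cases fuel with
    | zero => simp at h
    | succ f =>
      by_cases hc : c = '\n'
      · subst hc
        rw [show PySem.Chars.replace.go ['\n'] ['<','b','r','>'] (f+1) ('\n' :: t) acc
              = PySem.Chars.replace.go ['\n'] ['<','b','r','>'] f t (['<','b','r','>'].reverse ++ acc) by
            simp [PySem.Chars.replace.go, List.isPrefixOf]]
        rw [ih f _ (by simpa using h)]
        simp [pvExp, pvF]
      · have hb : ('\n' == c) = false := by simp [Ne.symm hc]
        rw [show PySem.Chars.replace.go ['\n'] ['<','b','r','>'] (f+1) (c :: t) acc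
              = PySem.Chars.replace.go ['\n'] ['<','b','r','>'] f t (c :: acc) by
            simp [PySem.Chars.replace.go, List.isPrefixOf, hb]]
        rw [ih f _ (by simpa using h)]
        simp [pvExp, pvF, hc]

theorem replace_eq (l : List Char) :
    PySem.Chars.replace l ['\n'] ['<','b','r','>'] = pvExp l := by
  rw [PySem.Chars.replace]
  simp only [List.isEmpty_cons, Bool.false_eq_true, if_false]
  exact replace_go_eq l l.length [] (le_refl _)

theorem foldl_append_map {α β : Type} (g : α → β) (l : List α) (acc : List β) :
    l.foldl (fun acc p => acc ++ [g p]) acc = acc ++ l.map g := by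
  induction l generalizing acc with
  | nil => simp
  | cons x xs ih => simp [List.foldl, ih]

theorem split?_NN (s : String) :
    PySem.Str.split? s "\n\n" = some (List.map String.ofList (pvSplitNN s.toList)) := by
  have h := PySem.Str.split?_map s "\n\n"
  rw [show PySem.Chars.split? s.toList "\n\n".toList
        = some (PySem.Chars.splitOn s.toList ['\n','\n']) by
      rw [PySem.Chars.split?]; rfl] at h
  cases hq : PySem.Str.split? s "\n\n" with
  | none => simp [hq] at h
  | some parts =>
    rw [hq] at h
    simp only [Option.map_some, Option.some.injEq] at h
    rw [splitNN_eq] at h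
    rw [← h, List.map_map]
    congr 1
    exact ((List.map_congr_left fun p _ => String.ofList_toList).trans (List.map_id parts)).symm

theorem split?_N (p : String) :
    PySem.Str.split? p "\n" = some (List.map String.ofList (pvSplitN p.toList)) := by
  have h := PySem.Str.split?_map p "\n"
  rw [show PySem.Chars.split? p.toList "\n".toList
        = some (PySem.Chars.splitOn p.toList ['\n']) by
      rw [PySem.Chars.split?]; rfl] at h
  cases hq : PySem.Str.split? p "\n" with
  | none => simp [hq] at h
  | some parts =>
    rw [hq] at h
    simp only [Option.map_some, Option.some.injEq] at h
    rw [splitN_eq] at h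
    rw [← h, List.map_map]
    congr 1
    exact ((List.map_congr_left fun q _ => String.ofList_toList).trans (List.map_id parts)).symm

-- each paragraph, re-split at single newlines and joined with "<br>", is its expansion
theorem paragraph_eq (p : List Char) :
    (PySem.Str.join "<br>" ((PySem.Str.split? (String.ofList p) "\n").getD [])).toList = pvExp p := by
  rw [split?_N, Option.getD_some, PySem.Str.toList_join, List.map_map]
  simp only [String.toList_ofList]
  rw [show List.map (String.toList ∘ String.ofList) (pvSplitN p) = pvSplitN p from
      (List.map_congr_left fun q _ => String.toList_ofList).trans (List.map_id _),
      show ("<br>".toList) = ['<','b','r','>'] from rfl]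
  exact joinN_eq p

-- ===== VERDICT (by name: the statement is the Claim_ definition above) =====
theorem format_email_message_spec : Claim_equal_format_email_message := by
  intro s _
  show format_email_message s = format_email_message_alt s
  show "<div dir=\"ltr\">" ++ PySem.Str.join "<br><br>"
      (List.foldl (fun acc paragraph =>
          acc ++ [PySem.Str.join "<br>" ((PySem.Str.split? paragraph "\n").getD [])]) []
        ((PySem.Str.split? s "\n\n").getD [])) ++ "</div>"
    = "<div dir=\"ltr\">" ++ PySem.Str.replace s "\n" "<br>" ++ "</div>"
  rw [split?_NN, Option.getD_some, foldl_append_map, List.nil_append]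
  congr 1
  · congr 1
    apply String.toList_inj.mp
    rw [PySem.Str.toList_replace, PySem.Str.toList_join, List.map_map,
        show ("\n".toList) = ['\n'] from rfl,
        show ("<br>".toList) = ['<','b','r','>'] from rfl, replace_eq]
    rw [show List.map (String.toList ∘ fun p =>
          PySem.Str.join "<br>" ((PySem.Str.split? p "\n").getD []))
          (List.map String.ofList (pvSplitNN s.toList))
        = List.map pvExp (pvSplitNN s.toList) by
      rw [List.map_map]
      exact List.map_congr_left fun p _ => paragraph_eq p]
    exact joinNN_eq s.toList
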